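-- pv_equiv track=rewrite | github.com/pypi-data/pypi-mirror-341 | packages/neural-scope/neural_scope-0.3.0-py3-none-any.whl/advanced_analysis/ml_advisor/algorithm_recognition.py | _check_framework_alignment
-- ===== SOURCE A (Python) =====
-- from typing import Dict, List, Set, Optional, Any, Union, Tuple, Callable
--
-- def _check_framework_alignment(algo_name: str, frameworks: List[str]) -> bool:
--     """
--     Check if the algorithm aligns with detected frameworks.
--
--     Args:
--         algo_name: Name of the algorithm
--         frameworks: List of detected frameworks
--
--     Returns:
--         True if there's framework alignment, False otherwise
--     """
--     if not frameworks:
--         return False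
--
--     # Define framework-algorithm alignment pairs
--     framework_algo_alignment = {
--         "PyTorch": ["Transformer", "Vision Transformer", "Graph Neural Network", "Diffusion Model"],
--         "TensorFlow": ["Transformer", "Vision Transformer", "Diffusion Model"],
--         "JAX": ["Transformer", "Diffusion Model"]
--     }
--
--     for framework in frameworks:
--         if framework in framework_algo_alignment and algo_name in framework_algo_alignment[framework]:
--             return True
--
--     return False
-- ===== SOURCE B (Python) =====
-- from typing import List
--
-- def _check_framework_alignment(algo_name: str, frameworks: List[str]) -> bool:
--     """Closed-form dispatch on the algorithm: the constant table is replaced by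
--     explicit per-algorithm branches giving the aligned frameworks, followed by
--     a single disjointness test against the detected frameworks."""
--     if algo_name in ("Transformer", "Diffusion Model"):
--         allowed = frozenset(("PyTorch", "TensorFlow", "JAX"))
--     elif algo_name == "Vision Transformer":
--         allowed = frozenset(("PyTorch", "TensorFlow"))
--     elif algo_name == "Graph Neural Network":
--         allowed = frozenset(("PyTorch",))
--     else:
--         return False
--     return not allowed.isdisjoint(frameworks)
-- ===== Notes on version B (the rewrite author's own statement) =====
-- stated objective: alternative
-- what changed: B drops the framework->algorithms dict and A's per-framework loop with nested membership tests; it dispatches on algo_name with explicit branches yielding the set of aligned frameworks (empty-branch early return for unknown algorithms) and finishes with one set-disjointness test, correct because the table is a compile-time constant.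
import Mathlib
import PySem

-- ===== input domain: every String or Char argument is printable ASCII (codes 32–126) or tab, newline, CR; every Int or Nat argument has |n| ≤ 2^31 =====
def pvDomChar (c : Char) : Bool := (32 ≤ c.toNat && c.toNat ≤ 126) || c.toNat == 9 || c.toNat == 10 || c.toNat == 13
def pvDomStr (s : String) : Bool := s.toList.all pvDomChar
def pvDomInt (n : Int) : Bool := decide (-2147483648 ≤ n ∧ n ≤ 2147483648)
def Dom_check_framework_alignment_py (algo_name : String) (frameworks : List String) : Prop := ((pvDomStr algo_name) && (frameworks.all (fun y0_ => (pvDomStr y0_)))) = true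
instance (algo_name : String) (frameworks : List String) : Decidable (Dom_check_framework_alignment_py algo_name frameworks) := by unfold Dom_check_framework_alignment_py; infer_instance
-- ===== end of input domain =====

-- B replaces A's dict + per-framework loop with a closed-form dispatch on algo_name followed by one disjointness test; objective: alternative decomposition.

-- ===== PORT A =====
-- the constant framework→algorithms dict of A
def pvAlignTable : PySem.Dict String (List String) :=
  PySem.Dict.mk
    [("PyTorch", ["Transformer", "Vision Transformer", "Graph Neural Network", "Diffusion Model"]),
     ("TensorFlow", ["Transformer", "Vision Transformer", "Diffusion Model"]),
     ("JAX", ["Transformer", "Diffusion Model"])]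

-- the 'for framework in frameworks' loop with its early return
def pvAlignLoop (algo_name : String) : List String → Bool
  | [] => false
  | fw :: rest =>
      -- 'if framework in d and algo_name in d[framework]: return True'
      match PySem.Dict.get? pvAlignTable fw with
      | some algos => if algos.contains algo_name then true else pvAlignLoop algo_name rest
      | none => pvAlignLoop algo_name rest

def check_framework_alignment_py (algo_name : String) (frameworks : List String) : Bool :=
  if frameworks.isEmpty then false
  else pvAlignLoop algo_name frameworks

-- ===== PORT B =====
def check_framework_alignment_py_alt (algo_name : String) (frameworks : List String) : Bool :=
  if algo_name = "Transformer" ∨ algo_name = "Diffusion Model" then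
    -- not frozenset(("PyTorch","TensorFlow","JAX")).isdisjoint(frameworks)
    !(PySem.Set.isdisjoint (PySem.Set.ofList ["PyTorch", "TensorFlow", "JAX"]) frameworks)
  else if algo_name = "Vision Transformer" then
    !(PySem.Set.isdisjoint (PySem.Set.ofList ["PyTorch", "TensorFlow"]) frameworks)
  else if algo_name = "Graph Neural Network" then
    !(PySem.Set.isdisjoint (PySem.Set.ofList ["PyTorch"]) frameworks)
  else
    false

-- ===== PRECONDITION & SPEC =====
def Spec_check_framework_alignment_py (algo_name : String) (frameworks : List String) (out : Bool) : Prop := out = check_framework_alignment_py_alt algo_name frameworks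
instance (algo_name : String) (frameworks : List String) (out : Bool) : Decidable (Spec_check_framework_alignment_py algo_name frameworks out) := by unfold Spec_check_framework_alignment_py; infer_instance

-- ===== CLAIM (what is proved, stated in full; the proofs are below) =====
def Claim_equal_check_framework_alignment_py : Prop := ∀ (algo_name : String) (frameworks : List String), Dom_check_framework_alignment_py algo_name frameworks → Spec_check_framework_alignment_py algo_name frameworks (check_framework_alignment_py algo_name frameworks)

-- ===== LEMMAS AND PROOFS =====

-- one step of A's loop, rewritten as a condition on (algo_name, fw)
theorem pvAlignStep (algo_name fw : String) :
    (match PySem.Dict.get? pvAlignTable fw with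
      | some algos => algos.contains algo_name
      | none => false)
    = (if algo_name = "Transformer" ∨ algo_name = "Diffusion Model" then
         fw = "PyTorch" ∨ fw = "TensorFlow" ∨ fw = "JAX"
       else if algo_name = "Vision Transformer" then
         fw = "PyTorch" ∨ fw = "TensorFlow"
       else if algo_name = "Graph Neural Network" then
         fw = "PyTorch"
       else False : Bool) := by
  have hget : PySem.Dict.get? pvAlignTable fw =
      if fw = "PyTorch" then some ["Transformer", "Vision Transformer", "Graph Neural Network", "Diffusion Model"]
      else if fw = "TensorFlow" then some ["Transformer", "Vision Transformer", "Diffusion Model"]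
      else if fw = "JAX" then some ["Transformer", "Diffusion Model"]
      else none := by
    by_cases p1 : fw = "PyTorch" <;> by_cases p2 : fw = "TensorFlow" <;> by_cases p3 : fw = "JAX" <;>
      (simp_all [pvAlignTable, PySem.Dict.get?]) <;> tauto
  rw [hget]
  by_cases p1 : fw = "PyTorch" <;> by_cases p2 : fw = "TensorFlow" <;> by_cases p3 : fw = "JAX" <;>
    by_cases a1 : algo_name = "Transformer" <;> by_cases a2 : algo_name = "Diffusion Model" <;>
    by_cases a3 : algo_name = "Vision Transformer" <;> by_cases a4 : algo_name = "Graph Neural Network" <;>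
      simp_all

-- A's early-return loop equals 'any' of the step over frameworks
theorem pvAlignLoop_eq_any (algo_name : String) (frameworks : List String) :
    pvAlignLoop algo_name frameworks
    = frameworks.any (fun fw =>
        (match PySem.Dict.get? pvAlignTable fw with
          | some algos => algos.contains algo_name
          | none => false)) := by
  induction frameworks with
  | nil => rfl
  | cons fw rest ih =>
      simp only [pvAlignLoop, List.any_cons, ih]
      cases hg : PySem.Dict.get? pvAlignTable fw with
      | none => simp
      | some algos => by_cases hc : algos.contains algo_name <;> simp_all

-- B's disjointness test over a literal set equals 'any' of membership in that list
theorem pvDisjoint_eq_any (allowed frameworks : List String) :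
    (!(PySem.Set.isdisjoint (PySem.Set.ofList allowed) frameworks))
    = frameworks.any (fun fw => allowed.contains fw) := by
  by_cases h : PySem.Set.isdisjoint (PySem.Set.ofList allowed) frameworks = true
  · rw [h]; symm
    simp only [Bool.not_true, List.any_eq_false]
    intro fw hfw
    rw [PySem.Set.isdisjoint_iff] at h
    simp only [List.contains_eq_mem, decide_eq_false_iff_not]
    intro hmem
    exact h fw ((PySem.Set.mem_ofList allowed fw).mpr (by simpa using hmem)) hfw

  · have h' : ¬ (∀ x ∈ PySem.Set.ofList allowed, x ∉ frameworks) := by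
      rw [← PySem.Set.isdisjoint_iff]; exact h
    rw [Bool.not_eq_true] at h
    rw [h]; symm
    simp only [Bool.not_false, List.any_eq_true]
    push_neg at h'
    obtain ⟨x, hx, hmem⟩ := h'
    exact ⟨x, hmem, by simp [List.contains_eq_mem, (PySem.Set.mem_ofList allowed x).mp hx]⟩

-- ===== VERDICT (by name: the statement is the Claim_ definition above) =====
theorem check_framework_alignment_py_spec : Claim_equal_check_framework_alignment_py := by
  intro algo_name frameworks _
  unfold Spec_check_framework_alignment_py check_framework_alignment_py check_framework_alignment_py_alt
  rw [pvDisjoint_eq_any, pvDisjoint_eq_any, pvDisjoint_eq_any]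
  by_cases hempty : frameworks.isEmpty
  · rcases List.isEmpty_iff.mp hempty with rfl
    simp
  · rw [if_neg hempty, pvAlignLoop_eq_any]
    split_ifs with h1 h2 h3
    · refine List.any_congr rfl fun fw => ?_
      rw [pvAlignStep]; simp_all
    · refine List.any_congr rfl fun fw => ?_
      rw [pvAlignStep]; simp_all
    · refine List.any_congr rfl fun fw => ?_
      rw [pvAlignStep]; simp_all
    · refine List.any_eq_false.mpr fun fw _ => ?_
      rw [Bool.not_eq_true]
      rw [pvAlignStep]; simp_all
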